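-- pv_equiv track=rewrite | github.com/aaaantoine/SaveFIW | parsers.py | getEntriesRaw
-- ===== SOURCE A (Python) =====
-- entryStart = '\t<!--Begin Msg Number '
--
-- def getEntriesRaw(html):
--     lines = html.split('\n')
--     output = []
--     collecting = False
--     for line in lines:
--         if line.startswith(entryStart):
--             collecting = True
--         if collecting:
--             output.append(line)
--             if line.startswith('    </table>'):
--                 yield '\n'.join(output)
--                 output = []
--                 collecting = False
-- ===== SOURCE B (Python) =====
-- entryStart = '\t<!--Begin Msg Number '
--
-- def getEntriesRaw(html):
--     # Find each block by locating the next begin-marker line and the next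
--     # end-marker line after it, then slice; no per-line state machine.
--     lines = html.split('\n')
--     while True:
--         start = next((k for k, l in enumerate(lines) if l.startswith(entryStart)), None)
--         if start is None:
--             return
--         rest = lines[start:]
--         end = next((k for k, l in enumerate(rest) if l.startswith('    </table>')), None)
--         if end is None:
--             return
--         yield '\n'.join(rest[:end + 1])
--         lines = rest[end + 1:]
-- ===== Notes on version B (the rewrite author's own statement) =====
-- stated objective: alternative
-- what changed: Replaced the single-pass collecting-flag state machine over the lines with a loop that repeatedly finds the next begin-marker line index and the next end-marker line index and slices each block out directly.
import Mathlib
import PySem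

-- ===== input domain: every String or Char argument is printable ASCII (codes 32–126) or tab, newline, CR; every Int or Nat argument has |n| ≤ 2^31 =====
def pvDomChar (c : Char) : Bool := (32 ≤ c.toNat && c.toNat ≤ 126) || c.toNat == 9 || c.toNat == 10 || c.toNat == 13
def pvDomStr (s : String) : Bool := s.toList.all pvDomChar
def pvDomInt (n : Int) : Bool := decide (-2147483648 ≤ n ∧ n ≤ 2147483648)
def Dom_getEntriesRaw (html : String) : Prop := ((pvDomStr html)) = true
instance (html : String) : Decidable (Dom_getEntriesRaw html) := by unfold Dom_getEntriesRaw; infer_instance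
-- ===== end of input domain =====

-- B replaces A's per-line collecting-flag state machine by repeatedly locating the
-- next begin-marker / end-marker line indices and slicing the block out (simpler).

-- shared line predicates (both Pythons use the same startswith tests)
def pvIsStart (l : String) : Bool := PySem.Str.startswith l "\t<!--Begin Msg Number "
def pvIsEnd (l : String) : Bool := PySem.Str.startswith l "    </table>"

-- ===== PORT A =====
-- for line in lines: ... with state (output, collecting), yields accumulated in res
def pvALoop : List String → List String → Bool → List String → List String
  | [], _, _, res => res
  | line :: rest, output, collecting, res =>
    let collecting' := if pvIsStart line then true else collecting
    if collecting' then
      if pvIsEnd line then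
        pvALoop rest [] false (res ++ [PySem.Str.join "\n" (output ++ [line])])
      else
        pvALoop rest (output ++ [line]) collecting' res
    else
      pvALoop rest output collecting' res

def getEntriesRaw (html : String) : List String :=
  pvALoop (((PySem.Str.split? html "\n").getD [])) [] false []

-- ===== PORT B =====
-- while True: find first begin-marker line, find first end-marker line in the tail,
-- yield the joined slice, continue on the remainder
def pvBLoop (lines : List String) (acc : List String) : List String :=
  match h1 : lines.findIdx? pvIsStart with
  | none => acc
  | some s =>
    match h2 : (lines.drop s).findIdx? pvIsEnd with
    | none => acc
    | some e =>
      pvBLoop ((lines.drop s).drop (e + 1))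
        (acc ++ [PySem.Str.join "\n" ((lines.drop s).take (e + 1))])
  termination_by lines.length
  decreasing_by
    have hs := (List.findIdx?_eq_some_iff_getElem.mp h1).1
    simp only [List.length_drop]
    omega

def getEntriesRaw_alt (html : String) : List String :=
  pvBLoop (((PySem.Str.split? html "\n").getD [])) []

-- ===== PRECONDITION & SPEC =====
def Spec_getEntriesRaw (html : String) (out : List String) : Prop := out = getEntriesRaw_alt html
instance (html : String) (out : List String) : Decidable (Spec_getEntriesRaw html out) := by unfold Spec_getEntriesRaw; infer_instance

-- ===== CLAIM (what is proved, stated in full; the proofs are below) =====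
def Claim_equal_getEntriesRaw : Prop := ∀ (html : String), Dom_getEntriesRaw html → Spec_getEntriesRaw html (getEntriesRaw html)

-- ===== LEMMAS AND PROOFS =====

-- while not collecting, lines failing the start test are skipped with no state change
lemma pvALoop_skip (pre : List String) (rest output res : List String)
    (h : ∀ l ∈ pre, pvIsStart l = false) :
    pvALoop (pre ++ rest) output false res = pvALoop rest output false res := by
  induction pre with
  | nil => rfl
  | cons x xs ih =>
    have hx : pvIsStart x = false := h x (by simp)
    simp only [List.cons_append, pvALoop, hx]
    exact ih (fun l hl => h l (by simp [hl]))

-- while collecting, lines failing the end test are appended to output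
lemma pvALoop_collect (pre : List String) (rest output res : List String)
    (h : ∀ l ∈ pre, pvIsEnd l = false) :
    pvALoop (pre ++ rest) output true res = pvALoop rest (output ++ pre) true res := by
  induction pre generalizing output with
  | nil => simp
  | cons x xs ih =>
    have hx : pvIsEnd x = false := h x (by simp)
    simp only [List.cons_append, pvALoop, hx, ite_self, if_true, if_false, Bool.false_eq_true]
    rw [ih (output ++ [x]) (fun l hl => h l (by simp [hl]))]
    simp

-- entering a start line is the same as already collecting there
lemma pvALoop_start (x : String) (ls output res : List String) (hx : pvIsStart x = true) :
    pvALoop (x :: ls) output false res = pvALoop (x :: ls) output true res := by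
  simp [pvALoop, hx]

-- if no line passes the start test, nothing more is emitted
lemma pvALoop_none (lines output res : List String)
    (h : ∀ l ∈ lines, pvIsStart l = false) :
    pvALoop lines output false res = res := by
  have := pvALoop_skip lines [] output res h
  simpa using this

-- while collecting with no end line ahead, nothing more is emitted
lemma pvALoop_noEnd (lines output res : List String)
    (h : ∀ l ∈ lines, pvIsEnd l = false) :
    pvALoop lines output true res = res := by
  have := pvALoop_collect lines [] output res h
  simpa using this

lemma pvMain (n : Nat) : ∀ (lines acc : List String), lines.length ≤ n →
    pvALoop lines [] false acc = pvBLoop lines acc := by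
  induction n with
  | zero =>
    intro lines acc h
    have hnil : lines = [] := List.eq_nil_of_length_eq_zero (Nat.le_zero.mp h)
    subst hnil
    rw [pvBLoop]
    rfl
  | succ n ih =>
    intro lines acc hlen
    rw [pvBLoop]
    split
    · next h1 =>
      exact pvALoop_none lines [] acc
        (fun l hl => List.findIdx?_eq_none_iff.mp h1 l hl)
    · next s h1 =>
      obtain ⟨hs, hps, hbefore⟩ := List.findIdx?_eq_some_iff_getElem.mp h1
      -- step 1: skip the prefix before the first start line
      have hskip : pvALoop lines [] false acc = pvALoop (lines.drop s) [] false acc := by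
        conv_lhs => rw [(List.take_append_drop s lines).symm]
        apply pvALoop_skip
        intro l hl
        obtain ⟨j, hj, hjl⟩ := List.mem_take_iff_getElem.mp hl
        have hj' : j < s := by omega
        rw [← hjl]
        exact Bool.eq_false_iff.mpr (hbefore j hj')
      -- step 2: the head of the remainder is a start line
      have hdropS : lines.drop s = lines[s] :: lines.drop (s + 1) :=
        List.drop_eq_getElem_cons hs
      have hstart : pvALoop (lines.drop s) [] false acc
          = pvALoop (lines.drop s) [] true acc := by
        rw [hdropS]; exact pvALoop_start _ _ [] acc hps
      split
      · next h2 =>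
        rw [hskip, hstart]
        exact pvALoop_noEnd _ [] acc
          (fun l hl => List.findIdx?_eq_none_iff.mp h2 l hl)
      · next e h2 =>
        obtain ⟨he, hpe, hebefore⟩ := List.findIdx?_eq_some_iff_getElem.mp h2
        -- step 3: collect the lines before the end line
        have hcollect : pvALoop (lines.drop s) [] true acc
            = pvALoop ((lines.drop s).drop e) ((lines.drop s).take e) true acc := by
          conv_lhs => rw [(List.take_append_drop e (lines.drop s)).symm]
          have := pvALoop_collect ((lines.drop s).take e) ((lines.drop s).drop e) [] acc
            (fun l hl => by
              obtain ⟨j, hj, hjl⟩ := List.mem_take_iff_getElem.mp hl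
              have hj' : j < e := by omega
              rw [← hjl]
              exact Bool.eq_false_iff.mpr (hebefore j hj'))
          simpa using this
        -- step 4: the end line fires a yield
        have hdropE : (lines.drop s).drop e
            = (lines.drop s)[e] :: (lines.drop s).drop (e + 1) :=
          List.drop_eq_getElem_cons he
        have hyield : pvALoop ((lines.drop s).drop e) ((lines.drop s).take e) true acc
            = pvALoop ((lines.drop s).drop (e + 1)) [] false
                (acc ++ [PySem.Str.join "\n" ((lines.drop s).take (e + 1))]) := by
          rw [hdropE]
          have htake : (lines.drop s).take e ++ [(lines.drop s)[e]]
              = (lines.drop s).take (e + 1) := by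
            rw [List.take_add_one]
            simp [List.getElem?_eq_getElem he]
          simp only [pvALoop, ite_self, if_true, hpe, htake]
        -- step 5: induction hypothesis on the strictly shorter remainder
        have hlen' : ((lines.drop s).drop (e + 1)).length ≤ n := by
          have h1 : (lines.drop s).length = lines.length - s := by simp
          simp only [List.length_drop]
          omega
        rw [hskip, hstart, hcollect, hyield]
        exact ih _ _ hlen'

-- ===== VERDICT (by name: the statement is the Claim_ definition above) =====
theorem getEntriesRaw_spec : Claim_equal_getEntriesRaw := by
  intro html _
  unfold Spec_getEntriesRaw getEntriesRaw getEntriesRaw_alt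
  exact pvMain (((PySem.Str.split? html "\n").getD [])).length _ _ le_rfl
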